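-- pv_equiv track=rewrite | github.com/tajohnsen/advent-of-code-2022 | 8/solve.py | row_score
-- ===== SOURCE A (Python) =====
-- def row_score(column_index, row):
--     index = column_index  # hack for the edges
--     for index in range(column_index - 1, -1, -1):
--         if row[index] >= row[column_index]:
--             break
--     left_score = column_index - index
--     index = column_index  # hack for the edges
--     for index in range(column_index + 1, len(row)):
--         if row[index] >= row[column_index]:
--             break
--     right_score = index - column_index
--     return right_score * left_score
-- ===== SOURCE B (Python) =====
-- def row_score(column_index, row):
--     height = row[column_index]
--     blockers_left = [i for i in range(column_index) if row[i] >= height]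
--     left = column_index - max(blockers_left) if blockers_left else column_index
--     blockers_right = [i for i in range(column_index + 1, len(row)) if row[i] >= height]
--     right = (min(blockers_right) if blockers_right else len(row) - 1) - column_index
--     return left * right
-- ===== Notes on version B (the rewrite author's own statement) =====
-- stated objective: alternative
-- what changed: Replaces A's two sequential break-on-blocker scans by a declarative formulation: build the list of blocker indices on each side with a comprehension and take the nearest one via max (left) / min (right), with the edge of the row as the default.
-- outside the precondition, e.g. on row_score(-1, [1, 2, 3]): A returns 0, B returns -3
import Mathlib
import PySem

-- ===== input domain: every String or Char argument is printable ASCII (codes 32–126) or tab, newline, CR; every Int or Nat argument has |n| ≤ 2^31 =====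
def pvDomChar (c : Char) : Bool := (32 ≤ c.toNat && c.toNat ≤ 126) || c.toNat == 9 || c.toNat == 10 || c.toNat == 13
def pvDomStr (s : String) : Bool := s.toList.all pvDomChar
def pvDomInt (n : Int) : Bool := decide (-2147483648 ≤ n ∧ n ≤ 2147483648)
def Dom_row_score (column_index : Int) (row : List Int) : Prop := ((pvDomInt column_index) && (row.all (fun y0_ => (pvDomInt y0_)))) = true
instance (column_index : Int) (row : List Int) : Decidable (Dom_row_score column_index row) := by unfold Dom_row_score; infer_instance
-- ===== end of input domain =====

-- B replaces A's two break-on-blocker index scans by building each side's blocker-index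
-- list with a filter and taking the nearest blocker via max/min (objective: alternative).


-- ===== PORT A =====
-- A's 'for index in range(…): if row[index] >= row[column_index]: break' with the loop
-- variable 'index' surviving the loop: returns the index at the break, or the last value
-- of the range, or the incoming 'index' (the edge hack) when the range is empty.
-- row[index] is ported as pyGetD (inside Pre_ every visited index is valid).
def pvALoop (vals : List Int) (row : List Int) (h : Int) (index : Int) : Int :=
  match vals with
  | [] => index
  | i :: rest => if PySem.List.pyGetD row i 0 ≥ h then i else pvALoop rest row h i

def row_score (column_index : Int) (row : List Int) : Int :=
  let h := PySem.List.pyGetD row column_index 0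
  let index₁ := pvALoop (PySem.List.pyRange (column_index - 1) (-1) (-1)) row h column_index
  let left_score := column_index - index₁
  let index₂ := pvALoop (PySem.List.pyRange (column_index + 1) (row.length : Int) 1) row h column_index
  let right_score := index₂ - column_index
  right_score * left_score

-- ===== PORT B =====
def row_score_alt (column_index : Int) (row : List Int) : Int :=
  let height := PySem.List.pyGetD row column_index 0
  let blockersLeft := (PySem.List.pyRange 0 column_index 1).filter
    (fun i => PySem.List.pyGetD row i 0 ≥ height)
  let left := match PySem.List.max? blockersLeft (fun y => y) with
    | some b => column_index - b
    | none => column_index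
  let blockersRight := (PySem.List.pyRange (column_index + 1) (row.length : Int) 1).filter
    (fun i => PySem.List.pyGetD row i 0 ≥ height)
  let right := (match PySem.List.min? blockersRight (fun y => y) with
    | some b => b
    | none => (row.length : Int) - 1) - column_index
  left * right

-- ===== PRECONDITION & SPEC =====
-- Pre_ restricts to the natural domain 0 ≤ column_index < len(row): outside it A either
-- raises IndexError (|column_index| out of range) or, for a negative in-range index,
-- returns 0 via Python's negative-index wraparound (A's empty left scan), a corner no
-- caller of this grid function reaches and which B's blocker-list scan values differently.
def Pre_row_score (column_index : Int) (row : List Int) : Prop :=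
  0 ≤ column_index ∧ column_index < (row.length : Int)
instance (column_index : Int) (row : List Int) : Decidable (Pre_row_score column_index row) := by unfold Pre_row_score; infer_instance

def pvWitness_row_score : Int × List Int := (1, [3, 1, 2])

def Spec_row_score (column_index : Int) (row : List Int) (out : Int) : Prop := out = row_score_alt column_index row
instance (column_index : Int) (row : List Int) (out : Int) : Decidable (Spec_row_score column_index row out) := by unfold Spec_row_score; infer_instance

-- ===== CLAIM (what is proved, stated in full; the proofs are below) =====
def Claim_equal_row_score : Prop := ∀ (column_index : Int) (row : List Int), Dom_row_score column_index row → Pre_row_score column_index row → Spec_row_score column_index row (row_score column_index row)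

-- ===== LEMMAS AND PROOFS =====

-- running max of a list of elements ≤ n, started below n, stays ≤ n
lemma pv_foldl_max_le (t : List Int) (x n : Int) (hx : x ≤ n) (ht : ∀ y ∈ t, y ≤ n) :
    t.foldl max x ≤ n := by
  induction t generalizing x with
  | nil => simpa using hx
  | cons a t ih =>
      simp only [List.foldl_cons]
      exact ih (max x a) (max_le hx (ht a (by simp))) (fun y hy => ht y (by simp [hy]))

-- running min of a list of elements ≥ x, started at x, is x
lemma pv_foldl_min_eq (t : List Int) (x : Int) (ht : ∀ y ∈ t, x ≤ y) :
    t.foldl min x = x := by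
  induction t with
  | nil => rfl
  | cons a t ih =>
      simp only [List.foldl_cons, min_eq_left (ht a (by simp))]
      exact ih (fun y hy => ht y (by simp [hy]))

-- Python max of l ++ [n] is n when every element of l is ≤ n
lemma pv_max_append (l : List Int) (n : Int) (hl : ∀ y ∈ l, y ≤ n) :
    PySem.List.max? (l ++ [n]) (fun y => y) = some n := by
  cases l with
  | nil => simp [PySem.List.max?_id_cons]
  | cons x t =>
      rw [List.cons_append, PySem.List.max?_id_cons]
      have hx : x ≤ n := hl x (by simp)
      have h1 : t.foldl max x ≤ n :=
        pv_foldl_max_le t x n hx (fun y hy => hl y (by simp [hy]))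
      simp [List.foldl_append, max_eq_right h1]

-- Python min of x :: t is x when every element of t is ≥ x
lemma pv_min_cons (t : List Int) (x : Int) (ht : ∀ y ∈ t, x ≤ y) :
    PySem.List.min? (x :: t) (fun y => y) = some x := by
  rw [PySem.List.min?_id_cons, pv_foldl_min_eq t x ht]

-- Left scan: A's countdown loop from n-1, started at n, lands on the largest blocker
-- index below n (B's max over the filtered range), or on 0 = (max?).getD 0 if none
-- (and on n = 0 itself when the range is empty, where getD 0 also gives 0).
lemma pv_left (row : List Int) (h : Int) (n : Nat) :
    pvALoop (PySem.List.pyRange ((n : Int) - 1) (-1) (-1)) row h (n : Int)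
      = (PySem.List.max? (((PySem.List.pyRange 0 (n : Int) 1).filter
          (fun i => PySem.List.pyGetD row i 0 ≥ h)) ) (fun y => y)).getD 0 := by
  induction n with
  | zero =>
      rw [PySem.List.pyRange_neg_one_eq_nil (by norm_num),
        PySem.List.pyRange_one_eq_nil (by norm_num)]
      simp [pvALoop, PySem.List.max?]
  | succ n ih =>
      have hcast : ((n + 1 : Nat) : Int) - 1 = (n : Int) := by push_cast; ring
      rw [hcast, PySem.List.pyRange_neg_one_cons (by omega)]
      have hsplit : PySem.List.pyRange 0 ((n + 1 : Nat) : Int) 1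
          = PySem.List.pyRange 0 (n : Int) 1 ++ [(n : Int)] := by
        have : ((n + 1 : Nat) : Int) = (n : Int) + 1 := by push_cast; ring
        rw [this, PySem.List.pyRange_one_succ_right (by omega)]
      rw [hsplit, List.filter_append]
      simp only [pvALoop]
      by_cases hb : PySem.List.pyGetD row (n : Int) 0 ≥ h
      · have hb' : decide (PySem.List.pyGetD row ((n : Int)) 0 ≥ h) = true := decide_eq_true hb
        rw [if_pos hb, List.filter_cons, List.filter_nil, if_pos hb']
        have hmax : PySem.List.max?
            ((PySem.List.pyRange 0 (n : Int) 1).filter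
              (fun i => PySem.List.pyGetD row i 0 ≥ h) ++ [(n : Int)]) (fun y => y)
            = some (n : Int) := by
          apply pv_max_append
          intro y hy
          have : y ∈ PySem.List.pyRange 0 (n : Int) 1 := List.mem_of_mem_filter hy
          have := (PySem.List.mem_pyRange_one.mp this).2
          omega
        rw [hmax, Option.getD_some]
      · have hb' : ¬ (decide (PySem.List.pyGetD row ((n : Int)) 0 ≥ h) = true) := by
          simpa using hb
        rw [if_neg hb, List.filter_cons, List.filter_nil, if_neg hb', List.append_nil]
        exact ih

-- Right scan: A's upward loop over range(a, len) with any carried index lands on the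
-- smallest blocker index (B's min over the filtered range) or on len-1 if none,
-- provided the range is nonempty (a < len).
lemma pv_right (row : List Int) (h : Int) (m : Nat) : ∀ (a idx : Int),
    0 ≤ a → a + (m : Int) = (row.length : Int) → a < (row.length : Int) →
    pvALoop (PySem.List.pyRange a (row.length : Int) 1) row h idx
      = (PySem.List.min? ((PySem.List.pyRange a (row.length : Int) 1).filter
          (fun i => PySem.List.pyGetD row i 0 ≥ h)) (fun y => y)).getD
          ((row.length : Int) - 1) := by
  induction m with
  | zero => intro a idx _ hlen hlt; omega
  | succ m ih =>
      intro a idx ha hlen hlt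
      rw [PySem.List.pyRange_one_cons hlt, List.filter_cons]
      simp only [pvALoop]
      by_cases hb : PySem.List.pyGetD row a 0 ≥ h
      · have hb' : decide (PySem.List.pyGetD row a 0 ≥ h) = true := decide_eq_true hb
        rw [if_pos hb, if_pos hb']
        have hmin : PySem.List.min?
            (a :: (PySem.List.pyRange (a + 1) (row.length : Int) 1).filter
              (fun i => PySem.List.pyGetD row i 0 ≥ h)) (fun y => y) = some a := by
          apply pv_min_cons
          intro y hy
          have : y ∈ PySem.List.pyRange (a + 1) (row.length : Int) 1 :=
            List.mem_of_mem_filter hy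
          have := (PySem.List.mem_pyRange_one.mp this).1
          omega
        rw [hmin, Option.getD_some]
      · have hb' : ¬ (decide (PySem.List.pyGetD row a 0 ≥ h) = true) := by simpa using hb
        rw [if_neg hb, if_neg hb']
        by_cases hend : a + 1 < (row.length : Int)
        · exact ih (a + 1) a (by omega) (by push_cast at hlen ⊢; omega) hend
        · have hlen1 : (row.length : Int) = a + 1 := by omega
          rw [hlen1, PySem.List.pyRange_one_eq_nil (by omega), List.filter_nil]
          simp only [pvALoop]
          rw [show PySem.List.min? ([] : List Int) (fun y => y) = none from rfl,
            Option.getD_none]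
          omega

-- ===== VERDICT (by name: the statement is the Claim_ definition above) =====
theorem row_score_spec : Claim_equal_row_score := by
  intro ci row _ hpre
  obtain ⟨h0, hlt⟩ := hpre
  unfold Spec_row_score row_score row_score_alt
  dsimp only
  obtain ⟨n, rfl⟩ : ∃ n : Nat, ci = (n : Int) := ⟨ci.toNat, (Int.toNat_of_nonneg h0).symm⟩
  set h := PySem.List.pyGetD row ((n : Int)) 0 with hh
  rw [pv_left row h n]
  -- left factors agree (getD 0 versus the match with default ci)
  have hleft : ((n : Int) - (PySem.List.max? (((PySem.List.pyRange 0 (n : Int) 1).filter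
      (fun i => PySem.List.pyGetD row i 0 ≥ h))) (fun y => y)).getD 0)
      = (match PySem.List.max? (((PySem.List.pyRange 0 (n : Int) 1).filter
          (fun i => PySem.List.pyGetD row i 0 ≥ h))) (fun y => y) with
        | some b => (n : Int) - b
        | none => (n : Int)) := by
    cases PySem.List.max? (((PySem.List.pyRange 0 (n : Int) 1).filter
        (fun i => PySem.List.pyGetD row i 0 ≥ h))) (fun y => y) with
    | none => simp
    | some b => simp
  -- right factors agree
  by_cases hend : (n : Int) + 1 < (row.length : Int)
  · rw [pv_right row h ((row.length : Int) - ((n : Int) + 1)).toNat ((n : Int) + 1) (n : Int)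
      (by omega) (by omega) hend]
    have hright : ∀ o : Option Int,
        o.getD ((row.length : Int) - 1) - (n : Int)
          = (match o with
            | some b => b
            | none => (row.length : Int) - 1) - (n : Int) := by
      intro o; cases o <;> simp
    rw [hright, ← hleft]; ring
  · -- empty right range: n = len - 1 on both sides
    have hle : (row.length : Int) ≤ (n : Int) + 1 := by omega
    rw [PySem.List.pyRange_one_eq_nil hle, List.filter_nil]
    simp only [pvALoop]
    rw [show PySem.List.min? ([] : List Int) (fun y => y) = none from rfl]
    have hn1 : (row.length : Int) - 1 = (n : Int) := by omega
    rw [← hleft, hn1]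
    ring
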